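-- pv_equiv track=rewrite | github.com/LewisYJohnson/FWA_S | data_preprocess/preprocess_for_data.py | locate_entity
-- ===== SOURCE A (Python) =====
-- def locate_entity(entity_tokens: list, word_sequence: list) -> list:
--     def locate_occurrences(target_token, token_sequence, is_end=False):
--         positions = []
--         for i, token in enumerate(token_sequence):
--             if is_end:
--                 if token == target_token[-1] or token.lower() == target_token[-1].lower():
--                     positions.append(i)
--             else:
--                 if token == target_token[0] or token.lower() == target_token[0].lower():
--                     positions.append(i)
--         return positions
--
--     found_range = (0, 0)
--     start_positions = locate_occurrences(entity_tokens, word_sequence, is_end=False)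
--     end_positions = locate_occurrences(entity_tokens, word_sequence, is_end=True)
--     if len(start_positions) == 1 and len(end_positions) == 1:
--         return start_positions[0], end_positions[0]
--     else:
--         for start in start_positions:
--             for end in end_positions:
--                 if start <= end:
--                     if word_sequence[start:end + 1] == entity_tokens:
--                         found_range = (start, end)
--                         break
--         return found_range[0], found_range[1]
-- ===== SOURCE B (Python) =====
-- def locate_entity(entity_tokens: list, word_sequence: list) -> list:
--     # Single pass over word_sequence: count (and remember the first index of)
--     # case-insensitive matches of the first/last entity token, and track the
--     # LAST exact occurrence of the whole entity. One O(n*m) scan replaces A's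
--     # position lists plus nested start*end loops.
--     first_lc = entity_tokens[0].lower()
--     last_lc = entity_tokens[-1].lower()
--     m = len(entity_tokens)
--     start_count = end_count = 0
--     first_start = first_end = 0
--     best = None
--     for i, word in enumerate(word_sequence):
--         w = word.lower()
--         if w == first_lc:
--             if start_count == 0:
--                 first_start = i
--             start_count += 1
--         if w == last_lc:
--             if end_count == 0:
--                 first_end = i
--             end_count += 1
--         if word_sequence[i:i + m] == entity_tokens:
--             best = (i, i + m - 1)
--     if start_count == 1 and end_count == 1:
--         return first_start, first_end
--     return best if best is not None else (0, 0)
-- ===== Notes on version B (the rewrite author's own statement) =====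
-- stated objective: faster
-- what changed: Replaces A's two occurrence-position lists plus a nested start*end loop with a single pass over word_sequence that counts/remembers the first case-insensitive match of the first and last entity token and tracks the last exact slice occurrence directly.
-- outside the precondition, e.g. on locate_entity([], []): A returns (0, 0), B raises IndexError
import Mathlib
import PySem

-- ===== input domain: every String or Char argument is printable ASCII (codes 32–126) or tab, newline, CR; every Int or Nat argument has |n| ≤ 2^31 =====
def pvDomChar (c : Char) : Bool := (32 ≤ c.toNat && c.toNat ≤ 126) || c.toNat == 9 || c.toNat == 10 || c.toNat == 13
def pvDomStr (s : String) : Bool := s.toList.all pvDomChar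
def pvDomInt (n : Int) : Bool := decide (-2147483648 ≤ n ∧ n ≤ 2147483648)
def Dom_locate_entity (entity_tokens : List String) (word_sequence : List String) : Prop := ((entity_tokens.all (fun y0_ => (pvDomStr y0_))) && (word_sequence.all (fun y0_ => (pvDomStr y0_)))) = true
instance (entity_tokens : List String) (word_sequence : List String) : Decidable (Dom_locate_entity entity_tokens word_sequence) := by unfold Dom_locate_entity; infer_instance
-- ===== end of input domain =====

-- B: one scan over word_sequence (counts + first indices of the boundary tokens, last exact slice occurrence) instead of A's two position lists and nested start×end loop.

-- ===== PORT A =====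
-- locate_occurrences: append index i whenever token matches entity_tokens[0] (resp. [-1]) exactly or case-insensitively.
-- entity_tokens[0]/[-1] via pyGet?; the .getD "" arm is unreachable under Pre_ (entity_tokens ≠ []).
def pvLocOcc (target_token : List String) (token_sequence : List String) (is_end : Bool) : List Int :=
  (PySem.List.enumerate token_sequence).foldl
    (fun positions p =>
      if is_end then
        if p.2 == (PySem.List.pyGet? target_token (-1)).getD ""
            || PySem.Str.lower p.2 == PySem.Str.lower ((PySem.List.pyGet? target_token (-1)).getD "") then
          positions ++ [p.1]
        else positions
      else
        if p.2 == (PySem.List.pyGet? target_token 0).getD ""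
            || PySem.Str.lower p.2 == PySem.Str.lower ((PySem.List.pyGet? target_token 0).getD "") then
          positions ++ [p.1]
        else positions)
    []

def locate_entity (entity_tokens : List String) (word_sequence : List String) : Int × Int :=
  let start_positions := pvLocOcc entity_tokens word_sequence false
  let end_positions := pvLocOcc entity_tokens word_sequence true
  if start_positions.length == 1 && end_positions.length == 1 then
    (start_positions.headD 0, end_positions.headD 0)
  else
    -- inner 'for end in end_positions … break' = first end with start ≤ end and word_sequence[start:end+1] == entity_tokens
    let found_range := start_positions.foldl
      (fun found_range start =>
        match end_positions.find? (fun e =>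
            decide (start ≤ e) && (PySem.List.slice word_sequence (some start) (some (e + 1)) == entity_tokens)) with
        | some e => (start, e)
        | none => found_range)
      ((0 : Int), (0 : Int))
    (found_range.1, found_range.2)

-- ===== PORT B =====
-- loop body of Source B; state (start_count, first_start, end_count, first_end, best)
def pvAltStep (first_lc last_lc : String) (m : Int) (entity_tokens word_sequence : List String)
    (st : Int × Int × Int × Int × Option (Int × Int)) (p : Int × String) :
    Int × Int × Int × Int × Option (Int × Int) :=
  let w := PySem.Str.lower p.2
  let sc := if w == first_lc then st.1 + 1 else st.1
  let fs := if w == first_lc && st.1 == 0 then p.1 else st.2.1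
  let ec := if w == last_lc then st.2.2.1 + 1 else st.2.2.1
  let fe := if w == last_lc && st.2.2.1 == 0 then p.1 else st.2.2.2.1
  let best := if PySem.List.slice word_sequence (some p.1) (some (p.1 + m)) == entity_tokens then
      some (p.1, p.1 + m - 1) else st.2.2.2.2
  (sc, fs, ec, fe, best)

def locate_entity_alt (entity_tokens : List String) (word_sequence : List String) : Int × Int :=
  let first_lc := PySem.Str.lower ((PySem.List.pyGet? entity_tokens 0).getD "")
  let last_lc := PySem.Str.lower ((PySem.List.pyGet? entity_tokens (-1)).getD "")
  let m : Int := entity_tokens.length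
  let res := (PySem.List.enumerate word_sequence).foldl
    (pvAltStep first_lc last_lc m entity_tokens word_sequence)
    ((0 : Int), (0 : Int), (0 : Int), (0 : Int), (none : Option (Int × Int)))
  if res.1 == 1 && res.2.2.1 == 1 then (res.2.1, res.2.2.2.1)
  else
    match res.2.2.2.2 with
    | some b => b
    | none => ((0 : Int), (0 : Int))

-- ===== PRECONDITION & SPEC =====
-- Pre_ excludes empty entity_tokens: there A raises IndexError whenever word_sequence is nonempty, and
-- on the one remaining input ([], []) A's (0, 0) is an accident of never reading entity_tokens (B raises).
def Pre_locate_entity (entity_tokens : List String) (word_sequence : List String) : Prop :=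
  entity_tokens ≠ []
instance (entity_tokens : List String) (word_sequence : List String) : Decidable (Pre_locate_entity entity_tokens word_sequence) := by unfold Pre_locate_entity; infer_instance

def pvWitness_locate_entity : List String × List String := (["New", "York"], ["in", "new", "York", "City"])

def Spec_locate_entity (entity_tokens : List String) (word_sequence : List String) (out : Int × Int) : Prop := out = locate_entity_alt entity_tokens word_sequence
instance (entity_tokens : List String) (word_sequence : List String) (out : Int × Int) : Decidable (Spec_locate_entity entity_tokens word_sequence out) := by unfold Spec_locate_entity; infer_instance

-- ===== CLAIM (what is proved, stated in full; the proofs are below) =====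
def Claim_equal_locate_entity : Prop := ∀ (entity_tokens : List String) (word_sequence : List String), Dom_locate_entity entity_tokens word_sequence → Pre_locate_entity entity_tokens word_sequence → Spec_locate_entity entity_tokens word_sequence (locate_entity entity_tokens word_sequence)

-- ===== LEMMAS AND PROOFS =====

theorem pv_lower_or (w t : String) :
    (w == t || PySem.Str.lower w == PySem.Str.lower t) = (PySem.Str.lower w == PySem.Str.lower t) := by
  by_cases h : w = t
  · subst h; simp
  · simp [h]

-- the start/end match predicates (proof-side abbreviations)
def pvPS (et : List String) (p : Int × String) : Bool :=
  PySem.Str.lower p.2 == PySem.Str.lower ((PySem.List.pyGet? et 0).getD "")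
def pvPE (et : List String) (p : Int × String) : Bool :=
  PySem.Str.lower p.2 == PySem.Str.lower ((PySem.List.pyGet? et (-1)).getD "")
-- exact-occurrence test at index i
def pvQ (et ws : List String) (i : Int) : Bool :=
  PySem.List.slice ws (some i) (some (i + (et.length : Int))) == et

theorem pvLocOcc_start (et ws : List String) :
    pvLocOcc et ws false = ((PySem.List.enumerate ws).filter (pvPS et)).map Prod.fst := by
  unfold pvLocOcc pvPS
  simp only [Bool.false_eq_true, if_false, pv_lower_or, PySem.List.foldl_append_if, List.nil_append]

theorem pvLocOcc_end (et ws : List String) :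
    pvLocOcc et ws true = ((PySem.List.enumerate ws).filter (pvPE et)).map Prod.fst := by
  unfold pvLocOcc pvPE
  simp only [if_true, pv_lower_or, PySem.List.foldl_append_if, List.nil_append]

-- B's fold decomposes: counts/first indices come from the filtered lists, best is the option fold
theorem pvAltFold_char (f l : String) (m : Int) (et ws : List String)
    (lst : List (Int × String)) (sc fs ec fe : Int) (best : Option (Int × Int))
    (hsc : 0 ≤ sc) (hec : 0 ≤ ec) :
    lst.foldl (pvAltStep f l m et ws) (sc, fs, ec, fe, best) =
      ( sc + ((lst.filter (fun p => PySem.Str.lower p.2 == f)).length : Int),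
        (if sc = 0 then (((lst.filter (fun p => PySem.Str.lower p.2 == f)).map Prod.fst).headD fs) else fs),
        ec + ((lst.filter (fun p => PySem.Str.lower p.2 == l)).length : Int),
        (if ec = 0 then (((lst.filter (fun p => PySem.Str.lower p.2 == l)).map Prod.fst).headD fe) else fe),
        lst.foldl (fun b p => if PySem.List.slice ws (some p.1) (some (p.1 + m)) == et then
          some (p.1, p.1 + m - 1) else b) best ) := by
  induction lst generalizing sc fs ec fe best with
  | nil => simp
  | cons x xs ih =>
    simp only [List.foldl_cons, List.filter_cons]
    have hstep : pvAltStep f l m et ws (sc, fs, ec, fe, best) x =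
      ((if PySem.Str.lower x.2 == f then sc + 1 else sc),
       (if PySem.Str.lower x.2 == f && sc == 0 then x.1 else fs),
       (if PySem.Str.lower x.2 == l then ec + 1 else ec),
       (if PySem.Str.lower x.2 == l && ec == 0 then x.1 else fe),
       (if PySem.List.slice ws (some x.1) (some (x.1 + m)) == et then some (x.1, x.1 + m - 1) else best)) := rfl
    rw [hstep, ih _ _ _ _ _ (by split_ifs <;> omega) (by split_ifs <;> omega)]
    have h1 : ¬ (sc + 1 = 0) := by omega
    have h2 : ¬ (ec + 1 = 0) := by omega
    by_cases hs : (PySem.Str.lower x.2 == f) = true <;>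
      by_cases he : (PySem.Str.lower x.2 == l) = true <;>
      by_cases hsc : sc = 0 <;> by_cases hec : ec = 0 <;>
      simp [hs, he, hsc, hec, h1, h2] <;> omega

-- find? returns the unique satisfying element
theorem pv_find?_unique {α : Type} (p : α → Bool) (l : List α) (a : α)
    (ha : a ∈ l) (hiff : ∀ x ∈ l, p x = true ↔ x = a) :
    l.find? p = some a := by
  induction l with
  | nil => cases ha
  | cons x xs ih =>
    by_cases hx : x = a
    · subst hx
      simp [List.find?, (hiff x (by simp)).2 rfl]
    · have hpx : p x = false := by
        rcases Bool.eq_false_or_eq_true (p x) with h | h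
        · exact absurd ((hiff x (by simp)).1 h) hx
        · exact h
      have ha' : a ∈ xs := by
        rcases List.mem_cons.1 ha with h | h
        · exact absurd h.symm hx
        · exact h
      simp [List.find?, hpx]
      exact ih ha' (fun x hx' => hiff x (List.mem_cons_of_mem _ hx'))

-- slice facts
theorem pv_slice_nat (ws : List String) (k n : Nat) :
    PySem.List.slice ws (some (k : Int)) (some ((k : Int) + (n : Int))) = (ws.drop k).take n := by
  exact PySem.List.slice_natCast_add ws k n

theorem pvQ_take (et ws : List String) (k : Nat) :
    pvQ et ws (k : Int) = ((ws.drop k).take et.length == et) := by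
  unfold pvQ; rw [pv_slice_nat]

theorem pvQ_eq (et ws : List String) (k : Nat) (h : pvQ et ws (k : Int) = true) :
    (ws.drop k).take et.length = et := by
  rw [pvQ_take] at h; exact eq_of_beq h

theorem pvQ_head (et ws : List String) (k : Nat) (het : et ≠ []) (h : pvQ et ws (k : Int) = true) :
    ∃ (hk : k < ws.length), ws[k] = et.head het := by
  have heq := pvQ_eq et ws k h
  have hm : 0 < et.length := List.length_pos_of_ne_nil het
  have hlen := congrArg List.length heq
  simp [List.length_take, List.length_drop] at hlen
  have hk : k < ws.length := by omega
  refine ⟨hk, ?_⟩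
  have h0 := congrArg (fun l => l[0]?) heq
  simp only [List.getElem?_take, List.getElem?_drop] at h0
  simp only [hm, if_true, Nat.add_zero] at h0
  rw [List.head_eq_getElem, List.getElem_eq_iff, h0, List.getElem?_eq_getElem]

theorem pvQ_last (et ws : List String) (k : Nat) (het : et ≠ []) (h : pvQ et ws (k : Int) = true) :
    ∃ (hk : k + et.length - 1 < ws.length), ws[k + et.length - 1] = et.getLast het := by
  have heq := pvQ_eq et ws k h
  have hm : 0 < et.length := List.length_pos_of_ne_nil het
  have hlen := congrArg List.length heq
  simp [List.length_take, List.length_drop] at hlen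
  have hk : k + et.length - 1 < ws.length := by omega
  refine ⟨hk, ?_⟩
  have h0 := congrArg (fun l => l[et.length - 1]?) heq
  simp only [List.getElem?_take, List.getElem?_drop] at h0
  simp only [show et.length - 1 < et.length by omega, if_true] at h0
  rw [List.getLast_eq_getElem, List.getElem_eq_iff]
  have hidx : k + et.length - 1 = k + (et.length - 1) := by omega
  rw [hidx, h0, List.getElem?_eq_getElem]

theorem pv_pyGet_zero (et : List String) (het : et ≠ []) :
    (PySem.List.pyGet? et 0).getD "" = et.head het := by
  cases et with
  | nil => exact absurd rfl het
  | cons x xs => simp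

theorem pv_pyGet_neg_one (et : List String) (het : et ≠ []) :
    (PySem.List.pyGet? et (-1)).getD "" = et.getLast het := by
  rw [PySem.List.pyGet?_neg_one, List.getLast?_eq_some_getLast het]
  rfl

theorem pv_mem_ep (et ws : List String) (e : Int) :
    e ∈ ((PySem.List.enumerate ws).filter (pvPE et)).map Prod.fst ↔
      ∃ j : Nat, j < ws.length ∧ e = (j : Int) ∧ pvPE et ((j : Int), ws[j]!) = true := by
  simp only [List.mem_map, List.mem_filter, PySem.List.mem_enumerate_iff]
  constructor
  · rintro ⟨p, ⟨⟨j, hj, rfl⟩, hpe⟩, rfl⟩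
    refine ⟨j, hj, by simp, ?_⟩
    simpa [getElem!_pos, hj] using hpe
  · rintro ⟨j, hj, rfl, hpe⟩
    refine ⟨((j : Int), ws[j]), ⟨⟨j, hj, by simp⟩, ?_⟩, rfl⟩
    simpa [getElem!_pos, hj] using hpe

theorem pv_pred_char (et ws : List String) (het : et ≠ []) (k j : Nat) (hj : j < ws.length) :
    ((decide ((k : Int) ≤ (j : Int)) && (PySem.List.slice ws (some (k : Int)) (some ((j : Int) + 1)) == et)) = true) ↔
      (pvQ et ws (k : Int) = true ∧ j = k + et.length - 1) := by
  have hm : 0 < et.length := List.length_pos_of_ne_nil het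
  have hcast : ((j : Int) + 1) = ((j + 1 : Nat) : Int) := by push_cast; ring
  constructor
  · intro h
    simp only [Bool.and_eq_true, decide_eq_true_eq, beq_iff_eq] at h
    obtain ⟨hle, hsl⟩ := h
    have hkj : k ≤ j := by exact_mod_cast hle
    rw [hcast, PySem.List.slice_natCast] at hsl
    have hlen := congrArg List.length hsl
    simp [List.length_take, List.length_drop] at hlen
    have hjm : j + 1 - k = et.length := by omega
    rw [hjm] at hsl
    refine ⟨?_, by omega⟩
    rw [pvQ_take]
    exact beq_iff_eq.2 hsl
  · rintro ⟨hq, rfl⟩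
    have heq := pvQ_eq et ws k hq
    simp only [Bool.and_eq_true, decide_eq_true_eq, beq_iff_eq]
    constructor
    · exact_mod_cast (by omega : k ≤ k + et.length - 1)
    · rw [hcast, PySem.List.slice_natCast]
      rw [show k + et.length - 1 + 1 - k = et.length by omega]
      exact heq

-- characterization of A's inner find? loop at a start s = ↑k with k < |ws|
theorem pv_find_char (et ws : List String) (het : et ≠ []) (k : Nat) (_hk : k < ws.length) :
    (((PySem.List.enumerate ws).filter (pvPE et)).map Prod.fst).find?
        (fun e => decide ((k : Int) ≤ e) && (PySem.List.slice ws (some (k : Int)) (some (e + 1)) == et)) =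
      (if pvQ et ws (k : Int) then some ((k : Int) + (et.length : Int) - 1) else none) := by
  have hm : 0 < et.length := List.length_pos_of_ne_nil het
  by_cases hq : pvQ et ws (k : Int) = true
  · rw [if_pos hq]
    apply pv_find?_unique
    · rw [pv_mem_ep]
      obtain ⟨hkl, hlast⟩ := pvQ_last et ws k het hq
      refine ⟨k + et.length - 1, hkl, by omega, ?_⟩
      unfold pvPE
      rw [pv_pyGet_neg_one et het]
      rw [getElem!_pos ws _ hkl, hlast]
      simp
    · intro x hx
      rw [pv_mem_ep] at hx
      obtain ⟨j, hj, rfl, -⟩ := hx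
      rw [pv_pred_char et ws het k j hj]
      constructor
      · rintro ⟨-, rfl⟩
        omega
      · intro hx
        exact ⟨hq, by omega⟩
  · rw [if_neg hq]
    rw [List.find?_eq_none]
    intro x hx
    rw [pv_mem_ep] at hx
    obtain ⟨j, hj, rfl, -⟩ := hx
    intro hpred
    exact hq ((pv_pred_char et ws het k j hj).1 hpred).1

-- dropping non-matching elements from the best-fold
theorem pv_fold_filter (ws et : List String) (m : Int) (pS : Int × String → Bool)
    (lst : List (Int × String)) (b : Option (Int × Int))
    (himp : ∀ p ∈ lst, (PySem.List.slice ws (some p.1) (some (p.1 + m)) == et) = true → pS p = true) :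
    lst.foldl (fun b p => if PySem.List.slice ws (some p.1) (some (p.1 + m)) == et then
        some (p.1, p.1 + m - 1) else b) b =
      (lst.filter pS).foldl (fun b p => if PySem.List.slice ws (some p.1) (some (p.1 + m)) == et then
        some (p.1, p.1 + m - 1) else b) b := by
  induction lst generalizing b with
  | nil => rfl
  | cons x xs ih =>
    by_cases hx : pS x = true
    · simp only [List.foldl_cons, List.filter_cons, hx, if_pos]
      exact ih _ (fun p hp => himp p (List.mem_cons_of_mem _ hp))
    · have hq : (PySem.List.slice ws (some x.1) (some (x.1 + m)) == et) = false := by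
        rcases Bool.eq_false_or_eq_true (PySem.List.slice ws (some x.1) (some (x.1 + m)) == et) with h | h
        · exact absurd (himp x (by simp) h) hx
        · exact h
      simp only [List.foldl_cons, List.filter_cons, hx, hq, Bool.false_eq_true, if_false]
      exact ih _ (fun p hp => himp p (List.mem_cons_of_mem _ hp))

-- A's default-pair fold is the unwrapped option fold
theorem pv_fold_unwrap (q : Int → Bool) (g : Int → Int × Int) (l : List Int) (b : Option (Int × Int)) :
    l.foldl (fun fr s => if q s then g s else fr) (match b with | some x => x | none => ((0 : Int), (0 : Int))) =
      (match l.foldl (fun b s => if q s then some (g s) else b) b with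
        | some x => x | none => ((0 : Int), (0 : Int))) := by
  induction l generalizing b with
  | nil => rfl
  | cons x xs ih =>
    by_cases hx : q x = true
    · simpa [hx] using ih (some (g x))
    · simpa [hx] using ih b

-- ===== VERDICT (by name: the statement is the Claim_ definition above) =====
theorem pv_mem_sp (et ws : List String) (s : Int)
    (hs : s ∈ ((PySem.List.enumerate ws).filter (pvPS et)).map Prod.fst) :
    ∃ k : Nat, k < ws.length ∧ s = (k : Int) := by
  simp only [List.mem_map, List.mem_filter, PySem.List.mem_enumerate_iff] at hs
  obtain ⟨p, ⟨⟨j, hj, rfl⟩, -⟩, rfl⟩ := hs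
  exact ⟨j, hj, by simp⟩

theorem locate_entity_spec : Claim_equal_locate_entity := by
  intro et ws _hdom hpre
  have het : et ≠ [] := hpre
  have hm : 0 < et.length := List.length_pos_of_ne_nil het
  have hPS : (fun p : Int × String => PySem.Str.lower p.2 == PySem.Str.lower ((PySem.List.pyGet? et 0).getD "")) = pvPS et := rfl
  have hPE : (fun p : Int × String => PySem.Str.lower p.2 == PySem.Str.lower ((PySem.List.pyGet? et (-1)).getD "")) = pvPE et := rfl
  unfold Spec_locate_entity
  simp only [locate_entity, locate_entity_alt]
  rw [pvLocOcc_start, pvLocOcc_end]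
  rw [pvAltFold_char _ _ _ et ws _ 0 0 0 0 none le_rfl le_rfl, hPS, hPE]
  set S := (PySem.List.enumerate ws).filter (pvPS et) with hS
  set E := (PySem.List.enumerate ws).filter (pvPE et) with hE
  -- the A-side inner find? loop, rewritten pointwise on members of S.map fst
  have hfoldA : (S.map Prod.fst).foldl
      (fun fr s => match (E.map Prod.fst).find? (fun e => decide (s ≤ e) && (PySem.List.slice ws (some s) (some (e + 1)) == et)) with
        | some e => (s, e) | none => fr) ((0 : Int), (0 : Int)) =
      (S.map Prod.fst).foldl (fun fr s => if pvQ et ws s then (s, s + (et.length : Int) - 1) else fr) ((0 : Int), (0 : Int)) := by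
    apply PySem.List.foldl_congr_mem
    intro b s hs
    obtain ⟨k, hk, rfl⟩ := pv_mem_sp et ws s hs
    rw [hE, pv_find_char et ws het k hk]
    by_cases hq : pvQ et ws (k : Int) = true
    · simp [hq]
    · simp [hq]
  -- B's best-tracker skips indices outside S, then is the same fold over S.map fst
  have himp : ∀ p ∈ PySem.List.enumerate ws,
      (PySem.List.slice ws (some p.1) (some (p.1 + (et.length : Int))) == et) = true → pvPS et p = true := by
    intro p hp hsl
    rw [PySem.List.mem_enumerate_iff] at hp
    obtain ⟨j, hj, rfl⟩ := hp
    have hq : pvQ et ws (j : Int) = true := by simpa [pvQ] using hsl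
    obtain ⟨hjl, hhead⟩ := pvQ_head et ws j het hq
    unfold pvPS
    rw [pv_pyGet_zero et het]
    simp [hhead]
  have hfoldB := pv_fold_filter ws et (et.length : Int) (pvPS et) (PySem.List.enumerate ws) none himp
  have hun := pv_fold_unwrap (pvQ et ws) (fun s => (s, s + (et.length : Int) - 1)) (S.map Prod.fst) none
  have hElse : (S.map Prod.fst).foldl
      (fun fr s => match (E.map Prod.fst).find? (fun e => decide (s ≤ e) && (PySem.List.slice ws (some s) (some (e + 1)) == et)) with
        | some e => (s, e) | none => fr) ((0 : Int), (0 : Int)) =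
      (match (PySem.List.enumerate ws).foldl
          (fun b p => if PySem.List.slice ws (some p.1) (some (p.1 + (et.length : Int))) == et then
            some (p.1, p.1 + (et.length : Int) - 1) else b) none with
        | some b => b | none => ((0 : Int), (0 : Int))) := by
    rw [hfoldA, hfoldB]
    have hmap : ((S.map Prod.fst).foldl
        (fun b s => if pvQ et ws s = true then some (s, s + (et.length : Int) - 1) else b) none) =
        (S.foldl (fun b p => if PySem.List.slice ws (some p.1) (some (p.1 + (et.length : Int))) == et then
            some (p.1, p.1 + (et.length : Int) - 1) else b) none) := by
      rw [List.foldl_map]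
      rfl
    rw [← hS, ← hmap, ← hun]
  by_cases hc1 : S.length = 1 <;> by_cases hc2 : E.length = 1
  · rw [if_pos (by simp [List.length_map, hc1, hc2]), if_pos (by simp [hc1, hc2])]
    simp
  · rw [if_neg (by simp [List.length_map, hc2]), if_neg (by simp [hc2]), ← hElse]
  · rw [if_neg (by simp [List.length_map, hc1]), if_neg (by simp [hc1]), ← hElse]
  · rw [if_neg (by simp [List.length_map, hc1]), if_neg (by simp [hc1]), ← hElse]
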